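-- pv_equiv track=rewrite | github.com/sushantkhara/Python-Programs | Array/Find Third and Second Smallest element.py | get_third_smallest
-- ===== SOURCE A (Python) =====
-- def get_third_smallest(arr, total):
--     for i in range(total):
--         for j in range(i+1, total):
--             if arr[i] > arr[j]:
--                 temp = arr[i]
--                 arr[i] = arr[j]
--                 arr[j] = temp
--
--     return arr[2]
-- ===== SOURCE B (Python) =====
-- def get_third_smallest(arr, total):
--     k = max(total, 0)
--     arr[:k] = sorted(arr[:k])
--     return arr[2]
-- ===== Notes on version B (the rewrite author's own statement) =====
-- stated objective: faster
-- what changed: Replaces the hand-written O(n^2) swap-based selection sort of the first `total` elements with a single library sort of that prefix (Timsort), then indexes the result; same in-place mutation of arr's prefix.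
import Mathlib
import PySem

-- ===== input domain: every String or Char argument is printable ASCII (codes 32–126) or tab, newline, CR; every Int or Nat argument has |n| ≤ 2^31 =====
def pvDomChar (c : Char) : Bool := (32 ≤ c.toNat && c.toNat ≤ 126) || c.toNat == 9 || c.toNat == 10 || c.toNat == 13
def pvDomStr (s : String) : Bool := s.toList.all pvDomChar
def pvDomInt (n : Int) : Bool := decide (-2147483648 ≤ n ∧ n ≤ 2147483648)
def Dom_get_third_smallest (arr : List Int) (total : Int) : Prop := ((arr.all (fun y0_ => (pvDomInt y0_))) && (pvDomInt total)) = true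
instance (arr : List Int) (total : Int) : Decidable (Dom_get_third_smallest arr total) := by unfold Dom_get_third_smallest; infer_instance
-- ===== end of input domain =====

-- B replaces A's hand-written O(total^2) swap-based sort of the prefix arr[:total] by one library
-- sort of that prefix (objective: faster, asymptotic); both mutate arr's prefix identically in Python.


-- ===== PORT A =====
-- Literal port of A: double index loop; arr[i]/arr[j] reads and writes via pyGetD/pySetD
-- (exact under Pre_, which keeps every index in range); returns arr[2] at the end.
def get_third_smallest (arr : List Int) (total : Int) : Int :=
  PySem.List.pyGetD
    ((PySem.List.pyRange 0 total 1).foldl (fun a i =>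
      (PySem.List.pyRange (i + 1) total 1).foldl (fun a j =>
        if PySem.List.pyGetD a i 0 > PySem.List.pyGetD a j 0 then
          -- temp = arr[i]; arr[i] = arr[j]; arr[j] = temp
          PySem.List.pySetD (PySem.List.pySetD a i (PySem.List.pyGetD a j 0)) j
            (PySem.List.pyGetD a i 0)
        else a) a) arr)
    2 0

-- ===== PORT B =====
-- Literal port of Source B: k = max(total, 0); arr[:k] = sorted(arr[:k]); return arr[2].
def get_third_smallest_alt (arr : List Int) (total : Int) : Int :=
  PySem.List.pyGetD
    (PySem.List.sorted (PySem.List.slice arr none (some (max total 0))) (fun x => x) false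
      ++ PySem.List.slice arr (some (max total 0)) none)
    2 0

-- ===== PRECONDITION & SPEC =====
-- Exactly the inputs on which A returns: arr has at least 3 elements (else the final arr[2]
-- raises IndexError) and total ≤ len(arr) (else the loops index past the end).
def Pre_get_third_smallest (arr : List Int) (total : Int) : Prop :=
  3 ≤ arr.length ∧ total ≤ (arr.length : Int)
instance (arr : List Int) (total : Int) : Decidable (Pre_get_third_smallest arr total) := by
  unfold Pre_get_third_smallest; infer_instance

def pvWitness_get_third_smallest : List Int × Int := ([5, 1, 4, 2], 4)

def Spec_get_third_smallest (arr : List Int) (total : Int) (out : Int) : Prop := out = get_third_smallest_alt arr total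
instance (arr : List Int) (total : Int) (out : Int) : Decidable (Spec_get_third_smallest arr total out) := by unfold Spec_get_third_smallest; infer_instance

-- ===== CLAIM (what is proved, stated in full; the proofs are below) =====
def Claim_equal_get_third_smallest : Prop := ∀ (arr : List Int) (total : Int), Dom_get_third_smallest arr total → Pre_get_third_smallest arr total → Spec_get_third_smallest arr total (get_third_smallest arr total)

-- ===== LEMMAS AND PROOFS =====

-- One pass of A's inner loop over a segment m :: l: (running minimum, the displaced rest).
def selPass : Int → List Int → Int × List Int
  | m, [] => (m, [])
  | m, y :: t =>
    if m > y then
      let p := selPass y t; (p.1, m :: p.2)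
    else
      let p := selPass m t; (p.1, y :: p.2)

theorem selPass_snd_length (m : Int) (l : List Int) : (selPass m l).2.length = l.length := by
  induction l generalizing m with
  | nil => rfl
  | cons y t ih => simp only [selPass]; split <;> simp [ih]

-- A's whole double loop, seen as recursion on the segment it sorts.
def selSort : List Int → List Int
  | [] => []
  | x :: t =>
    let p := selPass x t
    p.1 :: selSort p.2
termination_by l => l.length
decreasing_by simp [selPass_snd_length]

theorem selPass_perm (m : Int) (l : List Int) :
    ((selPass m l).1 :: (selPass m l).2).Perm (m :: l) := by
  induction l generalizing m with
  | nil => rfl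
  | cons y t ih =>
    simp only [selPass]
    split
    · exact (List.Perm.swap m _ _).trans ((ih y).cons m)
    · exact ((List.Perm.swap y _ _).trans ((ih m).cons y)).trans (List.Perm.swap m y t)

theorem selPass_min (m : Int) (l : List Int) :
    (selPass m l).1 ≤ m ∧ ∀ y ∈ (selPass m l).2, (selPass m l).1 ≤ y := by
  induction l generalizing m with
  | nil => exact ⟨le_refl _, by simp [selPass]⟩
  | cons y t ih =>
    simp only [selPass]
    split
    · rename_i h
      refine ⟨le_of_lt (lt_of_le_of_lt (ih y).1 h), ?_⟩
      intro z hz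
      rcases List.mem_cons.mp hz with rfl | hz
      · exact le_of_lt (lt_of_le_of_lt (ih y).1 h)
      · exact (ih y).2 z hz
    · rename_i h
      refine ⟨(ih m).1, ?_⟩
      intro z hz
      rcases List.mem_cons.mp hz with rfl | hz
      · exact le_trans (ih m).1 (not_lt.mp h)
      · exact (ih m).2 z hz

theorem selSort_perm (l : List Int) : (selSort l).Perm l := by
  induction l using selSort.induct with
  | case1 => simp [selSort]
  | case2 x t p ih =>
    rw [selSort]
    exact (ih.cons (selPass x t).1).trans (selPass_perm x t)

theorem selSort_pairwise (l : List Int) : (selSort l).Pairwise (· ≤ ·) := by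
  induction l using selSort.induct with
  | case1 => simp [selSort]
  | case2 x t p ih =>
    rw [selSort]
    refine List.Pairwise.cons ?_ ih
    intro z hz
    have hz' : z ∈ (selPass x t).2 := ((selSort_perm (selPass x t).2).mem_iff).mp hz
    exact (selPass_min x t).2 z hz'

theorem selSort_eq_sorted (l : List Int) :
    PySem.List.sorted l (fun x => x) false = selSort l :=
  PySem.List.sorted_id_eq_of_perm_of_pairwise l (selSort l) (selSort_perm l) (selSort_pairwise l)

-- A's inner-loop body on Nat indices.
def bodyN (a : List Int) (i j : Nat) : List Int :=
  if a.getD i 0 > a.getD j 0 then (a.set i (a.getD j 0)).set j (a.getD i 0) else a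

theorem getD_append_at (pre l : List Int) (k : Nat) :
    (pre ++ l).getD (pre.length + k) 0 = l.getD k 0 := by
  simp [List.getD_eq_getElem?_getD, List.getElem?_append_right]

theorem set_append_at (pre l : List Int) (k : Nat) (v : Int) :
    (pre ++ l).set (pre.length + k) v = pre ++ l.set k v := by
  rw [List.set_append_right _ _ (by omega)]
  simp

-- One inner pass, on the decomposed list: done already displaced, rem still to scan.
theorem inner_pass (rem : List Int) (pre done suf : List Int) (m : Int) :
    (List.range rem.length).foldl
      (fun a k => bodyN a pre.length (pre.length + 1 + done.length + k))
      (pre ++ m :: (done ++ rem ++ suf))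
    = pre ++ (selPass m rem).1 :: (done ++ (selPass m rem).2 ++ suf) := by
  induction rem generalizing m done with
  | nil => simp [selPass]
  | cons y t ih =>
    rw [List.length_cons, List.range_succ_eq_map, List.foldl_cons, List.foldl_map]
    have hget_m : (pre ++ m :: (done ++ y :: t ++ suf)).getD pre.length 0 = m := by
      simp
    have hget_y : (pre ++ m :: (done ++ y :: t ++ suf)).getD (pre.length + 1 + done.length + 0) 0 = y := by
      have h2 : pre.length + 1 + done.length + 0 = pre.length + (1 + done.length) := by omega
      rw [h2, getD_append_at pre (m :: (done ++ y :: t ++ suf)) (1 + done.length)]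
      have h3 : (1 : Nat) + done.length = done.length + 1 := by omega
      simp [h3, List.getD_eq_getElem?_getD]
    by_cases h : m > y
    · have hbody : bodyN (pre ++ m :: (done ++ y :: t ++ suf)) pre.length (pre.length + 1 + done.length + 0)
          = pre ++ y :: ((done ++ [m]) ++ t ++ suf) := by
        unfold bodyN
        rw [hget_m, hget_y, if_pos h]
        have h1 : (pre ++ m :: (done ++ y :: t ++ suf)).set pre.length y
            = pre ++ y :: (done ++ y :: t ++ suf) := by
          simp
        rw [h1]
        have h2 : pre.length + 1 + done.length + 0 = pre.length + (1 + done.length) := by omega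
        rw [h2, set_append_at pre (y :: (done ++ y :: t ++ suf)) (1 + done.length) m]
        congr 1
        have h3 : (1 : Nat) + done.length = done.length + 1 := by omega
        rw [h3]
        show (y :: (done ++ y :: t ++ suf)).set (done.length + 1) m = y :: ((done ++ [m]) ++ t ++ suf)
        simp only [List.set_cons_succ]
        have h4 := set_append_at done (y :: (t ++ suf)) 0 m
        simp only [Nat.add_zero] at h4
        simp [h4]
      rw [hbody]
      have hfun : (fun (a : List Int) (k : Nat) => bodyN a pre.length (pre.length + 1 + done.length + k.succ))
          = fun a k => bodyN a pre.length (pre.length + 1 + (done ++ [m]).length + k) := by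
        funext a k
        congr 1
        simp [Nat.succ_eq_add_one]
        omega
      rw [hfun, ih (done ++ [m]) y]
      simp only [selPass, if_pos h]
      simp
    · have hbody : bodyN (pre ++ m :: (done ++ y :: t ++ suf)) pre.length (pre.length + 1 + done.length + 0)
          = pre ++ m :: ((done ++ [y]) ++ t ++ suf) := by
        unfold bodyN
        rw [hget_m, hget_y, if_neg h]
        simp
      rw [hbody]
      have hfun : (fun (a : List Int) (k : Nat) => bodyN a pre.length (pre.length + 1 + done.length + k.succ))
          = fun a k => bodyN a pre.length (pre.length + 1 + (done ++ [y]).length + k) := by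
        funext a k
        congr 1
        simp [Nat.succ_eq_add_one]
        omega
      rw [hfun, ih (done ++ [y]) m]
      simp only [selPass, if_neg h]
      simp

-- The outer loop, on the decomposed list: pre.length + L is the fixed loop bound n.
theorem outer_loop (L : Nat) (seg pre suf : List Int) (hL : seg.length = L) :
    (List.range L).foldl
      (fun a k =>
        (List.range (pre.length + L - (pre.length + k + 1))).foldl
          (fun a j => bodyN a (pre.length + k) (pre.length + k + 1 + j)) a)
      (pre ++ seg ++ suf)
    = pre ++ selSort seg ++ suf := by
  induction L generalizing seg pre with
  | zero =>
    rw [List.length_eq_zero_iff.mp hL]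
    simp [selSort]
  | succ L ih =>
    cases seg with
    | nil => simp at hL
    | cons x t =>
      have ht : t.length = L := by simp at hL; exact hL
      rw [List.range_succ_eq_map, List.foldl_cons, List.foldl_map]
      have hcount : pre.length + (L + 1) - (pre.length + 0 + 1) = t.length := by omega
      have hidx : (fun (a : List Int) (j : Nat) => bodyN a (pre.length + 0) (pre.length + 0 + 1 + j))
          = fun a j => bodyN a pre.length (pre.length + 1 + ([] : List Int).length + j) := by
        funext a j
        norm_num
      have hlist : pre ++ (x :: t) ++ suf = pre ++ x :: (([] : List Int) ++ t ++ suf) := by simp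
      rw [hcount, hidx, hlist, inner_pass t pre [] suf x]
      have hfun : (fun (a : List Int) (k : Nat) =>
            (List.range (pre.length + (L + 1) - (pre.length + k.succ + 1))).foldl
              (fun a j => bodyN a (pre.length + k.succ) (pre.length + k.succ + 1 + j)) a)
          = fun a k =>
            (List.range ((pre ++ [(selPass x t).1]).length + L - ((pre ++ [(selPass x t).1]).length + k + 1))).foldl
              (fun a j => bodyN a ((pre ++ [(selPass x t).1]).length + k)
                (((pre ++ [(selPass x t).1]).length + k) + 1 + j)) a := by
        funext a k
        have h1 : pre.length + (L + 1) - (pre.length + k.succ + 1)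
            = (pre ++ [(selPass x t).1]).length + L - ((pre ++ [(selPass x t).1]).length + k + 1) := by
          simp [Nat.succ_eq_add_one]
          omega
        have h2 : pre.length + k.succ = (pre ++ [(selPass x t).1]).length + k := by
          simp [Nat.succ_eq_add_one]
          omega
        rw [h1, h2]
      have hlist2 : pre ++ (selPass x t).1 :: (([] : List Int) ++ (selPass x t).2 ++ suf)
          = (pre ++ [(selPass x t).1]) ++ (selPass x t).2 ++ suf := by simp
      rw [hfun, hlist2, ih (selPass x t).2 (pre ++ [(selPass x t).1]) (by rw [selPass_snd_length]; omega)]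
      rw [selSort]
      simp

-- Bridge: A's Int-indexed pyRange folds are the Nat-indexed folds above.
theorem portA_bridge (arr : List Int) (n : Nat) :
    (PySem.List.pyRange 0 (n : Int) 1).foldl (fun a i =>
      (PySem.List.pyRange (i + 1) (n : Int) 1).foldl (fun a j =>
        if PySem.List.pyGetD a i 0 > PySem.List.pyGetD a j 0 then
          PySem.List.pySetD (PySem.List.pySetD a i (PySem.List.pyGetD a j 0)) j
            (PySem.List.pyGetD a i 0)
        else a) a) arr
    = (List.range n).foldl
        (fun a k =>
          (List.range (n - (k + 1))).foldl (fun a j => bodyN a k (k + 1 + j)) a)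
        arr := by
  rw [PySem.List.pyRange_one]
  simp only [Int.sub_zero, Int.toNat_natCast]
  rw [List.foldl_map]
  apply PySem.List.foldl_congr_mem
  intro a i hi
  have hi' : i < n := List.mem_range.mp hi
  rw [PySem.List.pyRange_one]
  have hcount : (((n : Int)) - ((0 : Int) + (i : Int) + 1)).toNat = n - (i + 1) := by omega
  rw [hcount, List.foldl_map]
  apply PySem.List.foldl_congr_mem
  intro a' j _
  have hidx : ((i : Int)) + 1 + (j : Int) = ((i + 1 + j : Nat) : Int) := by push_cast; ring
  simp only [zero_add]
  have hg : ∀ (x : List Int), PySem.List.pyGetD x ((i : Int) + 1 + (j : Int)) 0 = x.getD (i + 1 + j) 0 := by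
    intro x; rw [hidx, PySem.List.pyGetD_natCast]
  have hs : ∀ (x : List Int) (v : Int), PySem.List.pySetD x ((i : Int) + 1 + (j : Int)) v = x.set (i + 1 + j) v := by
    intro x v; rw [hidx, PySem.List.pySetD_natCast]
  simp only [bodyN, hg, hs, PySem.List.pyGetD_natCast, PySem.List.pySetD_natCast,
    List.getD_eq_getElem?_getD]

-- ===== VERDICT (by name: the statement is the Claim_ definition above) =====
theorem get_third_smallest_spec : Claim_equal_get_third_smallest := by
  intro arr total _ hpre
  obtain ⟨hlen, htot⟩ := hpre
  unfold Spec_get_third_smallest get_third_smallest get_third_smallest_alt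
  by_cases hpos : 0 < total
  · have hn : total = ((total.toNat : Nat) : Int) := by omega
    set n := total.toNat with hndef
    have hnle : n ≤ arr.length := by omega
    rw [hn, portA_bridge arr n]
    have hmax : max ((n : Int)) 0 = (((n : Nat) : Int)) := by omega
    rw [hmax, PySem.List.slice_to_natCast, PySem.List.slice_from_natCast]
    have hsplit : arr = arr.take n ++ arr.drop n := (List.take_append_drop n arr).symm
    have hlen_take : (arr.take n).length = n := by simp [List.length_take, Nat.min_eq_left hnle]
    have houter := outer_loop n (arr.take n) [] (arr.drop n) hlen_take
    rw [selSort_eq_sorted]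
    congr 1
    calc (List.range n).foldl
          (fun a k => (List.range (n - (k + 1))).foldl (fun a j => bodyN a k (k + 1 + j)) a) arr
        = (List.range n).foldl
            (fun a k =>
              (List.range (([] : List Int).length + n - (([] : List Int).length + k + 1))).foldl
                (fun a j => bodyN a (([] : List Int).length + k) ((([] : List Int).length + k) + 1 + j)) a)
            (([] : List Int) ++ arr.take n ++ arr.drop n) := by
          simp only [List.length_nil, Nat.zero_add, List.nil_append]
          rw [← hsplit]
      _ = ([] : List Int) ++ selSort (arr.take n) ++ arr.drop n := houter
      _ = selSort (arr.take n) ++ arr.drop n := by simp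
  · have hz : (PySem.List.pyRange 0 total 1) = [] := by
      rw [PySem.List.pyRange_one]
      have h0 : total.toNat = 0 := by omega
      simp [h0]
    rw [hz]
    have hmax : max total 0 = (((0 : Nat) : Int)) := by
      rw [max_eq_right (by omega : total ≤ (0 : Int))]
      simp
    rw [hmax, PySem.List.slice_to_natCast, PySem.List.slice_from_natCast]
    simp [PySem.List.sorted]
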